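-- pv_equiv track=rewrite | github.com/EloisaRL/Metabolomic-data-analysis-app | pages/data_pre_processing_page_tabs/data_summary.py | get_removal_info
-- ===== SOURCE A (Python) =====
-- def get_removal_info(example_extra_id, ref_ids):
--     """
--     Determines if by removing a number of letters from the beginning (prefix) or
--     from the end (suffix) of the example_extra_id we can obtain a string that
--     is one of the reference IDs in ref_ids.
--
--     Parameters
--     ----------
--     example_extra_id : str
--         One metadata ID that contains extra letters.
--     ref_ids : list or set of str
--         The reference IDs that are considered correct.
--
--     Returns
--     -------
--     tuple : (removal_type, removal_amount)
--         removal_type is either 'prefix' or 'suffix', and removal_amount is the number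
--         of characters to remove. If no match is found, (None, 0) is returned.
--     """
--     ref_set = set(ref_ids)
--
--     best_prefix_removal = None
--     best_suffix_removal = None
--
--     # Check for prefix removal: try removing 0 to len(example_extra_id) characters from the start.
--     for k in range(0, len(example_extra_id) + 1):
--         candidate = example_extra_id[k:]
--         if candidate in ref_set:
--             best_prefix_removal = k
--             break  # minimal removal found.
--
--     # Check for suffix removal: try removing 0 to len(example_extra_id) characters from the end.
--     for k in range(0, len(example_extra_id) + 1):
--         # When k==0 no removal occurs.
--         candidate = example_extra_id[:-k] if k > 0 else example_extra_id
--         if candidate in ref_set: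
--             best_suffix_removal = k
--             break  # minimal removal found.
--
--     # Decide which removal works best.
--     if best_prefix_removal is None and best_suffix_removal is None:
--         return None, 0  # No valid removal found.
--     elif best_prefix_removal is not None and best_suffix_removal is not None:
--         if best_prefix_removal <= best_suffix_removal:
--             return 'prefix', best_prefix_removal
--         else:
--             return 'suffix', best_suffix_removal
--     elif best_prefix_removal is not None:
--         return 'prefix', best_prefix_removal
--     else:
--         return 'suffix', best_suffix_removal
-- ===== SOURCE B (Python) =====
-- def get_removal_info(example_extra_id, ref_ids):
--     """Scan the references once (startswith/endswith) instead of trying every cut point."""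
--     n = len(example_extra_id)
--     best_prefix_removal = None
--     best_suffix_removal = None
--     for r in set(ref_ids):
--         if example_extra_id.endswith(r):
--             k = n - len(r)
--             if best_prefix_removal is None or k < best_prefix_removal:
--                 best_prefix_removal = k
--         if example_extra_id.startswith(r):
--             k = n - len(r)
--             if best_suffix_removal is None or k < best_suffix_removal:
--                 best_suffix_removal = k
--     if best_prefix_removal is None and best_suffix_removal is None:
--         return None, 0
--     if best_suffix_removal is None:
--         return 'prefix', best_prefix_removal
--     if best_prefix_removal is None:
--         return 'suffix', best_suffix_removal
--     if best_prefix_removal <= best_suffix_removal: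
--         return 'prefix', best_prefix_removal
--     return 'suffix', best_suffix_removal
-- ===== Notes on version B (the rewrite author's own statement) =====
-- stated objective: faster
-- what changed: Instead of slicing the id at every cut point k and testing membership of the slice in the reference set, B makes one pass over the distinct references, using endswith/startswith to record the minimal prefix/suffix removal, then applies the same decision rule.
import Mathlib
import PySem

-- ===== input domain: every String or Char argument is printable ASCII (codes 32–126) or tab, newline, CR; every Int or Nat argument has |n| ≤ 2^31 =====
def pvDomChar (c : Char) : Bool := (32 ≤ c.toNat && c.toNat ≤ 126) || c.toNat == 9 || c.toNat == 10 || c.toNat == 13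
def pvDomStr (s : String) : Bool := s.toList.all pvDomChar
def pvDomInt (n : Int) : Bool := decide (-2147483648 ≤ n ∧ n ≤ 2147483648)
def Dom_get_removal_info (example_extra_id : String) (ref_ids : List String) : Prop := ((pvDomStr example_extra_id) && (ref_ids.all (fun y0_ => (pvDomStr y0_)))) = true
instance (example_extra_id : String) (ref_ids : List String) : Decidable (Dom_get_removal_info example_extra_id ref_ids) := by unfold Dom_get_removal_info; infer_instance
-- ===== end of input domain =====

-- B scans the distinct references once with startswith/endswith instead of slicing the id at
-- every cut point and testing the slice against the reference set; same return value
-- (objective: faster, confirmed).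

-- ===== PORT A =====
def pvPrefixLoop (s : String) (ref_set : PySem.Set String) : List Int → Option Int
  | [] => none
  | k :: ks =>
      if PySem.Set.contains ref_set (PySem.Str.slice s (some k) none) then some k
      else pvPrefixLoop s ref_set ks

def pvSuffixLoop (s : String) (ref_set : PySem.Set String) : List Int → Option Int
  | [] => none
  | k :: ks =>
      if PySem.Set.contains ref_set (if 0 < k then PySem.Str.slice s none (some (-k)) else s) then some k
      else pvSuffixLoop s ref_set ks

def get_removal_info (example_extra_id : String) (ref_ids : List String) : Option String × Int :=
  let ref_set : PySem.Set String := PySem.Set.ofList ref_ids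
  let ks := PySem.List.pyRange 0 (PySem.Str.len example_extra_id + 1) 1
  let best_prefix_removal := pvPrefixLoop example_extra_id ref_set ks
  let best_suffix_removal := pvSuffixLoop example_extra_id ref_set ks
  match best_prefix_removal, best_suffix_removal with
  | none, none => (none, 0)
  | some p, some q => if p ≤ q then (some "prefix", p) else (some "suffix", q)
  | some p, none => (some "prefix", p)
  | none, some q => (some "suffix", q)

-- ===== PORT B =====
-- 'if best is None or k < best: best = k'
def pvKeep (best : Option Int) (k : Int) : Option Int :=
  match best with
  | none => some k
  | some b => if k < b then some k else some b

def get_removal_info_alt (example_extra_id : String) (ref_ids : List String) : Option String × Int :=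
  let n := PySem.Str.len example_extra_id
  let st := (PySem.Set.ofList ref_ids).foldl
    (fun (acc : Option Int × Option Int) r =>
      ( if PySem.Str.endswith example_extra_id r then pvKeep acc.1 (n - PySem.Str.len r) else acc.1,
        if PySem.Str.startswith example_extra_id r then pvKeep acc.2 (n - PySem.Str.len r) else acc.2 ))
    (none, none)
  match st with
  | (none, none) => (none, 0)
  | (some p, none) => (some "prefix", p)
  | (none, some q) => (some "suffix", q)
  | (some p, some q) => if p ≤ q then (some "prefix", p) else (some "suffix", q)

-- ===== PRECONDITION & SPEC =====
def Spec_get_removal_info (example_extra_id : String) (ref_ids : List String) (out : Option String × Int) : Prop := out = get_removal_info_alt example_extra_id ref_ids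
instance (example_extra_id : String) (ref_ids : List String) (out : Option String × Int) : Decidable (Spec_get_removal_info example_extra_id ref_ids out) := by unfold Spec_get_removal_info; infer_instance

-- ===== CLAIM (what is proved, stated in full; the proofs are below) =====
def Claim_equal_get_removal_info : Prop := ∀ (example_extra_id : String) (ref_ids : List String), Dom_get_removal_info example_extra_id ref_ids → Spec_get_removal_info example_extra_id ref_ids (get_removal_info example_extra_id ref_ids)

-- ===== LEMMAS AND PROOFS =====

/-- `res` is the minimum of the set of integers satisfying `P` (none ↔ empty). -/
def pvIsMin (res : Option Int) (P : Int → Prop) : Prop :=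
  match res with
  | none => ∀ k, ¬ P k
  | some m => P m ∧ ∀ k, P k → m ≤ k

theorem pvIsMin_unique {res res' : Option Int} {P P' : Int → Prop}
    (h : pvIsMin res P) (h' : pvIsMin res' P') (hiff : ∀ k, P k ↔ P' k) : res = res' := by
  cases res with
  | none => cases res' with
    | none => rfl
    | some m' => exact absurd ((hiff m').mpr h'.1) (h m')
  | some m => cases res' with
    | none => exact absurd h.1 (fun hm => h' m ((hiff m).mp hm))
    | some m' =>
        have h1 := h.2 m' ((hiff m').mpr h'.1)
        have h2 := h'.2 m ((hiff m).mp h.1)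
        simp only [Option.some.injEq]; omega

theorem find?_isMin (p : Int → Bool) (l : List Int) (hl : l.Pairwise (· < ·)) :
    pvIsMin (l.find? p) (fun k => k ∈ l ∧ p k = true) := by
  induction l with
  | nil => intro k hk; simp at hk
  | cons a l ih =>
      have hlt : ∀ b ∈ l, a < b := (List.pairwise_cons.mp hl).1
      have ih' := ih (List.pairwise_cons.mp hl).2
      by_cases hpa : p a = true
      · have hfa : List.find? p (a :: l) = some a := by simp [hpa]
        rw [hfa]
        refine ⟨⟨List.mem_cons_self, hpa⟩, ?_⟩
        rintro k ⟨hk, _⟩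
        rcases List.mem_cons.mp hk with rfl | hk
        · exact le_refl _
        · exact le_of_lt (hlt k hk)
      · have hpa' : p a = false := by simpa using hpa
        have hfa : List.find? p (a :: l) = List.find? p l := by
          simp [hpa']
        rw [hfa]
        cases hres : l.find? p with
        | none =>
            rw [hres] at ih'
            rintro k ⟨hk, hpk⟩
            rcases List.mem_cons.mp hk with rfl | hk
            · exact hpa hpk
            · exact ih' k ⟨hk, hpk⟩
        | some m =>
            rw [hres] at ih'
            refine ⟨⟨List.mem_cons_of_mem _ ih'.1.1, ih'.1.2⟩, ?_⟩
            rintro k ⟨hk, hpk⟩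
            rcases List.mem_cons.mp hk with rfl | hk
            · exact absurd hpk hpa
            · exact ih'.2 k ⟨hk, hpk⟩

theorem pvPrefixLoop_eq_find? (s : String) (R : PySem.Set String) (l : List Int) :
    pvPrefixLoop s R l
      = l.find? (fun k => PySem.Set.contains R (PySem.Str.slice s (some k) none)) := by
  induction l with
  | nil => rfl
  | cons a l ih =>
      simp only [pvPrefixLoop, List.find?_cons, ih]
      cases hc : PySem.Set.contains R (PySem.Str.slice s (some a) none) <;> simp

theorem pvSuffixLoop_eq_find? (s : String) (R : PySem.Set String) (l : List Int) :
    pvSuffixLoop s R l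
      = l.find? (fun k => PySem.Set.contains R (if 0 < k then PySem.Str.slice s none (some (-k)) else s)) := by
  induction l with
  | nil => rfl
  | cons a l ih =>
      simp only [pvSuffixLoop, List.find?_cons, ih]
      cases hc : PySem.Set.contains R (if 0 < a then PySem.Str.slice s none (some (-a)) else s) <;> simp

theorem foldl_pair {α β γ : Type} (F : α → γ → α) (G : β → γ → β) (l : List γ) (a : α) (b : β) :
    l.foldl (fun acc r => (F acc.1 r, G acc.2 r)) (a, b) = (l.foldl F a, l.foldl G b) := by
  induction l generalizing a b with
  | nil => rfl
  | cons r l ih => simp [List.foldl_cons, ih]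

theorem pvKeep_spec (o : Option Int) (k : Int) :
    ∃ v, pvKeep o k = some v ∧ v ≤ k ∧ (∀ b, o = some b → v ≤ b) ∧ (v = k ∨ o = some v) := by
  cases o with
  | none => exact ⟨k, rfl, le_refl _, by simp, Or.inl rfl⟩
  | some b =>
      by_cases h : k < b
      · exact ⟨k, by simp [pvKeep, h], le_refl _, by intro b' hb'; simp at hb'; omega, Or.inl rfl⟩
      · exact ⟨b, by simp [pvKeep, h], by omega, by intro b' hb'; simp at hb'; omega, Or.inr rfl⟩

theorem pvIsMin_transfer {res : Option Int} {P P' : Int → Prop} (h : pvIsMin res P')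
    (hA : ∀ m, P' m → P m) (hB : ∀ m, P m → ∃ m', P' m' ∧ m' ≤ m) : pvIsMin res P := by
  cases res with
  | none =>
      intro k hk
      rcases hB k hk with ⟨m', hm', _⟩
      exact h m' hm'
  | some m =>
      refine ⟨hA m h.1, ?_⟩
      intro k hk
      rcases hB k hk with ⟨m', hm', hle⟩
      exact le_trans (h.2 m' hm') hle

theorem foldKeep_isMin (cond : String → Bool) (f : String → Int) (l : List String) :
    ∀ (o : Option Int),
      pvIsMin (l.foldl (fun acc r => if cond r then pvKeep acc (f r) else acc) o)
        (fun m => o = some m ∨ ∃ r ∈ l, cond r = true ∧ f r = m) := by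
  induction l with
  | nil =>
      intro o
      cases o with
      | none => intro k hk; simp at hk
      | some b =>
          refine ⟨Or.inl rfl, ?_⟩
          rintro k (hk | hk)
          · simp at hk; omega
          · simp at hk
  | cons r l ih =>
      intro o
      simp only [List.foldl_cons]
      refine pvIsMin_transfer (ih (if cond r then pvKeep o (f r) else o)) ?_ ?_
      · -- every value of the new predicate is a value of the old one
        rintro m (hm | ⟨r', hr', hcr', hfr'⟩)
        · by_cases hc : cond r = true
          · rw [if_pos hc] at hm
            rcases pvKeep_spec o (f r) with ⟨v, hv, _, _, hcase⟩
            rw [hv] at hm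
            simp only [Option.some.injEq] at hm
            subst hm
            rcases hcase with rfl | ho
            · exact Or.inr ⟨r, List.mem_cons_self, hc, rfl⟩
            · exact Or.inl ho
          · rw [if_neg hc] at hm
            exact Or.inl hm
        · exact Or.inr ⟨r', List.mem_cons_of_mem _ hr', hcr', hfr'⟩
      · -- every old value dominates some new value
        rintro m (hm | ⟨r', hr', hcr', hfr'⟩)
        · by_cases hc : cond r = true
          · rcases pvKeep_spec o (f r) with ⟨v, hv, _, hvb, _⟩
            exact ⟨v, Or.inl (by rw [if_pos hc, hv]), hvb m hm⟩
          · exact ⟨m, Or.inl (by rw [if_neg hc, hm]), le_refl m⟩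
        · rcases List.mem_cons.mp hr' with rfl | hmem
          · rcases pvKeep_spec o (f r') with ⟨v, hv, hvk, _, _⟩
            exact ⟨v, Or.inl (by rw [if_pos hcr', hv]), by omega⟩
          · exact ⟨m, Or.inr ⟨r', hmem, hcr', hfr'⟩, le_refl m⟩

theorem foldB_split (s : String) (l : List String) :
    l.foldl (fun (acc : Option Int × Option Int) r =>
        ( if PySem.Str.endswith s r then pvKeep acc.1 (PySem.Str.len s - PySem.Str.len r) else acc.1,
          if PySem.Str.startswith s r then pvKeep acc.2 (PySem.Str.len s - PySem.Str.len r) else acc.2 ))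
      (none, none)
    = (l.foldl (fun acc r => if PySem.Str.endswith s r then pvKeep acc (PySem.Str.len s - PySem.Str.len r) else acc) none,
       l.foldl (fun acc r => if PySem.Str.startswith s r then pvKeep acc (PySem.Str.len s - PySem.Str.len r) else acc) none) :=
  foldl_pair (fun (o : Option Int) r => if PySem.Str.endswith s r then pvKeep o (PySem.Str.len s - PySem.Str.len r) else o)
    (fun (o : Option Int) r => if PySem.Str.startswith s r then pvKeep o (PySem.Str.len s - PySem.Str.len r) else o) l none none

theorem prefix_pred_iff (s : String) (R : List String) (m : Int) :
    (m ∈ PySem.List.pyRange 0 ((s.toList.length : Int) + 1) 1 ∧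
        PySem.Set.contains R (PySem.Str.slice s (some m) none) = true)
    ↔ ∃ r ∈ R, PySem.Str.endswith s r = true ∧ (s.toList.length : Int) - PySem.Str.len r = m := by
  constructor
  · rintro ⟨hm, hc⟩
    have hm' := PySem.List.mem_pyRange_one.mp hm
    have hcast : m = ((m.toNat : Nat) : Int) := by omega
    have hr : (PySem.Str.slice s (some m) none).toList = s.toList.drop m.toNat := by
      simp only [PySem.Str.toList_slice, PySem.Chars.slice_eq_listSlice]
      rw [hcast, PySem.List.slice_from_natCast]
      simp
      omega
    refine ⟨PySem.Str.slice s (some m) none, by simpa [PySem.Set.contains] using hc, ?_, ?_⟩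
    · simp only [PySem.Str.endswith_eq]
      rw [PySem.Chars.endswith_iff, hr]
      exact List.drop_suffix _ _
    · have : PySem.Str.len (PySem.Str.slice s (some m) none)
          = ((PySem.Str.slice s (some m) none).toList.length : Int) := by simp
      rw [this, hr]
      simp only [List.length_drop]
      omega
  · rintro ⟨r, hrR, hsuf, hm⟩
    have hsuf' : r.toList <:+ s.toList := by
      rw [PySem.Str.endswith_eq, PySem.Chars.endswith_iff] at hsuf; exact hsuf
    have hlenle : r.toList.length ≤ s.toList.length := hsuf'.length_le
    have hlr : PySem.Str.len r = (r.toList.length : Int) := by simp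
    rw [hlr] at hm
    refine ⟨PySem.List.mem_pyRange_one.mpr (by omega), ?_⟩
    have hdrop : s.toList.drop m.toNat = r.toList := by
      obtain ⟨t, ht⟩ := hsuf'
      have htl : t.length = m.toNat := by
        have := congrArg List.length ht
        simp only [List.length_append] at this
        omega
      rw [← ht, ← htl, List.drop_left]
    have hslice : PySem.Str.slice s (some m) none = r := by
      apply String.toList_inj.mp
      have hcast : m = ((m.toNat : Nat) : Int) := by omega
      simp only [PySem.Str.toList_slice, PySem.Chars.slice_eq_listSlice]
      rw [hcast, PySem.List.slice_from_natCast]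
      exact hdrop
    rw [hslice]
    simpa [PySem.Set.contains] using hrR

theorem suffix_pred_iff (s : String) (R : List String) (m : Int) :
    (m ∈ PySem.List.pyRange 0 ((s.toList.length : Int) + 1) 1 ∧
        PySem.Set.contains R (if 0 < m then PySem.Str.slice s none (some (-m)) else s) = true)
    ↔ ∃ r ∈ R, PySem.Str.startswith s r = true ∧ (s.toList.length : Int) - PySem.Str.len r = m := by
  have hcand : ∀ m : Int, 0 ≤ m → m ≤ (s.toList.length : Int) →
      (if 0 < m then PySem.Str.slice s none (some (-m)) else s).toList
        = s.toList.take (s.toList.length - m.toNat) := by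
    intro m h0 hn
    by_cases hpos : 0 < m
    · rw [if_pos hpos]
      have hcast : m = ((m.toNat : Nat) : Int) := by omega
      simp only [PySem.Str.toList_slice, PySem.Chars.slice_eq_listSlice]
      rw [hcast, PySem.List.slice_to_neg_natCast _ _ (by omega : 0 < m.toNat)]
      simp
      omega
    · have : m = 0 := by omega
      subst this
      simp
  constructor
  · rintro ⟨hm, hc⟩
    have hm' := PySem.List.mem_pyRange_one.mp hm
    have hr := hcand m hm'.1 (by omega)
    refine ⟨_, by simpa [PySem.Set.contains] using hc, ?_, ?_⟩
    · simp only [PySem.Str.startswith_eq]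
      rw [PySem.Chars.startswith_iff, hr]
      exact List.take_prefix _ _
    · have : PySem.Str.len (if 0 < m then PySem.Str.slice s none (some (-m)) else s)
          = (((if 0 < m then PySem.Str.slice s none (some (-m)) else s)).toList.length : Int) := by simp
      rw [this, hr]
      simp only [List.length_take]
      omega
  · rintro ⟨r, hrR, hpre, hm⟩
    have hpre' : r.toList <+: s.toList := by
      rw [PySem.Str.startswith_eq, PySem.Chars.startswith_iff] at hpre; exact hpre
    have hlenle : r.toList.length ≤ s.toList.length := hpre'.length_le
    have hlr : PySem.Str.len r = (r.toList.length : Int) := by simp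
    rw [hlr] at hm
    refine ⟨PySem.List.mem_pyRange_one.mpr (by omega), ?_⟩
    have htake : s.toList.take (s.toList.length - m.toNat) = r.toList := by
      obtain ⟨t, ht⟩ := hpre'
      have : s.toList.length - m.toNat = r.toList.length := by omega
      rw [this, ← ht, List.take_left]
    have hcnd : (if 0 < m then PySem.Str.slice s none (some (-m)) else s) = r := by
      apply String.toList_inj.mp
      rw [hcand m (by omega) (by omega), htake]
    rw [hcnd]
    simpa [PySem.Set.contains] using hrR

-- ===== VERDICT (by name: the statement is the Claim_ definition above) =====
theorem get_removal_info_spec : Claim_equal_get_removal_info := by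
  intro s ref_ids _
  show get_removal_info s ref_ids = get_removal_info_alt s ref_ids
  have hlen : PySem.Str.len s = (s.toList.length : Int) := by simp
  have hpair : (PySem.List.pyRange 0 ((s.toList.length : Int) + 1) 1).Pairwise (· < ·) :=
    PySem.List.pairwise_lt_pyRange_one ..
  have hbp : pvPrefixLoop s (PySem.Set.ofList ref_ids) (PySem.List.pyRange 0 (PySem.Str.len s + 1) 1)
      = (PySem.Set.ofList ref_ids).foldl
          (fun acc r => if PySem.Str.endswith s r then pvKeep acc (PySem.Str.len s - PySem.Str.len r) else acc) none := by
    rw [hlen, pvPrefixLoop_eq_find?]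
    refine pvIsMin_unique (find?_isMin _ _ hpair) (foldKeep_isMin _ _ _ none) ?_
    intro m
    constructor
    · intro h
      exact Or.inr ((prefix_pred_iff s _ m).mp h)
    · rintro (h | h)
      · exact absurd h (by simp)
      · exact (prefix_pred_iff s _ m).mpr h
  have hbs : pvSuffixLoop s (PySem.Set.ofList ref_ids) (PySem.List.pyRange 0 (PySem.Str.len s + 1) 1)
      = (PySem.Set.ofList ref_ids).foldl
          (fun acc r => if PySem.Str.startswith s r then pvKeep acc (PySem.Str.len s - PySem.Str.len r) else acc) none := by
    rw [hlen, pvSuffixLoop_eq_find?]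
    refine pvIsMin_unique (find?_isMin _ _ hpair) (foldKeep_isMin _ _ _ none) ?_
    intro m
    constructor
    · intro h
      exact Or.inr ((suffix_pred_iff s _ m).mp h)
    · rintro (h | h)
      · exact absurd h (by simp)
      · exact (suffix_pred_iff s _ m).mpr h
  have key : ∀ (bp bs : Option Int),
      (match bp, bs with
       | none, none => ((none : Option String), (0 : Int))
       | some p, some q => if p ≤ q then (some "prefix", p) else (some "suffix", q)
       | some p, none => (some "prefix", p)
       | none, some q => (some "suffix", q))
      = (match ((bp, bs) : Option Int × Option Int) with
         | (none, none) => (none, 0)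
         | (some p, none) => (some "prefix", p)
         | (none, some q) => (some "suffix", q)
         | (some p, some q) => if p ≤ q then (some "prefix", p) else (some "suffix", q)) := by
    intro bp bs
    rcases bp with _ | p <;> rcases bs with _ | q <;> rfl
  simp only [get_removal_info, get_removal_info_alt, foldB_split, hbp, hbs]
  exact key _ _
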